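-- pv_equiv track=rewrite | github.com/CCE110/jottask | saas_scheduler.py | _group_tasks_by_category
-- ===== SOURCE A (Python) =====
-- def _group_tasks_by_category(tasks):
--     """Bucket a list of tasks by category, preserving input order within each bucket."""
--     groups = {}
--     for t in tasks:
--         cat = t.get('category') or 'Uncategorized'
--         groups.setdefault(cat, []).append(t)
--     # DSW Solar first (it's Rob's hottest pipeline), then alphabetical
--     ordered = {}
--     if 'DSW Solar' in groups:
--         ordered['DSW Solar'] = groups.pop('DSW Solar')
--     for k in sorted(groups):
--         ordered[k] = groups[k]
--     return ordered
-- ===== SOURCE B (Python) =====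
-- def _group_tasks_by_category(tasks):
--     """Bucket a list of tasks by category, preserving input order within each bucket."""
--     def cat(t):
--         return t.get('category') or 'Uncategorized'
--     cats = list(dict.fromkeys(map(cat, tasks)))
--     head = ['DSW Solar'] if 'DSW Solar' in cats else []
--     tail = sorted(c for c in cats if c != 'DSW Solar')
--     return {c: [t for t in tasks if cat(t) == c] for c in head + tail}
-- ===== Notes on version B (the rewrite author's own statement) =====
-- stated objective: simpler
-- what changed: Replaces the mutable bucket dict (setdefault/append, pop, rebuild) with a pure pipeline: dedup the resolved categories once, compute the ordered category list (DSW Solar first, rest sorted), and build the result by filtering the tasks per category.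
import Mathlib
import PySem

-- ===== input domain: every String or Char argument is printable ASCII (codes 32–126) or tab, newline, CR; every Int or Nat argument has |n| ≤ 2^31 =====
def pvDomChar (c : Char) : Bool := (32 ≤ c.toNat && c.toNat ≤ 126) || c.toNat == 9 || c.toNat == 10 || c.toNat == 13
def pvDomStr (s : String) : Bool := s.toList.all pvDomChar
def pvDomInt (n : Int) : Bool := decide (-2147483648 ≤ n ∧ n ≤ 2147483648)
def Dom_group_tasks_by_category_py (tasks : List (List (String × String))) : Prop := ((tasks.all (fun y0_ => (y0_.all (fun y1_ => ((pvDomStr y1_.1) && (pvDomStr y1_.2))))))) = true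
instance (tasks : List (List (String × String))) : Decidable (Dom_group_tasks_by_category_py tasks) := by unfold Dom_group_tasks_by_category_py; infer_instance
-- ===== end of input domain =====

-- B replaces A's mutable bucket dict (setdefault/append, pop, rebuild) with a pure pipeline:
-- dedup the resolved categories, order them (DSW Solar first, rest sorted), filter tasks per category.

-- ===== PORT A =====
-- shared helper (same line in both Pythons): `t.get('category') or 'Uncategorized'`
-- (the empty string is the only falsy string, None comes from a missing key)
def pvCat (t : List (String × String)) : String :=
  match (PySem.Dict.mk t).get? "category" with
  | none => "Uncategorized"
  | some v => if v == "" then "Uncategorized" else v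

def group_tasks_by_category_py (tasks : List (List (String × String))) :
    List (String × List (List (String × String))) :=
  -- `groups.setdefault(cat, []).append(t)` sets groups[cat] = groups.get(cat, []) + [t]
  -- keeping the key's position: exactly Dict.modify
  let groups := tasks.foldl
    (fun g t => g.modify (pvCat t) [] (fun l => l ++ [t]))
    (PySem.Dict.empty : PySem.Dict String (List (List (String × String))))
  -- `ordered['DSW Solar'] = groups.pop('DSW Solar')`: read the value, then remove the key
  let ordered : PySem.Dict String (List (List (String × String))) :=
    if groups.contains "DSW Solar" then
      PySem.Dict.empty.insert "DSW Solar" (groups.getD "DSW Solar" [])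
    else PySem.Dict.empty
  let groups := if groups.contains "DSW Solar" then groups.erase "DSW Solar" else groups
  -- `for k in sorted(groups): ordered[k] = groups[k]` (k is always a key, so getD never defaults)
  let ordered := (PySem.List.sorted groups.keys (fun k => k) false).foldl
    (fun o k => o.insert k (groups.getD k [])) ordered
  ordered.items

-- ===== PORT B =====
def group_tasks_by_category_py_alt (tasks : List (List (String × String))) :
    List (String × List (List (String × String))) :=
  let cats := PySem.List.dedup (tasks.map pvCat)
  let head := if "DSW Solar" ∈ cats then ["DSW Solar"] else []
  let tail := PySem.List.sorted (cats.filter (fun c => !(c == "DSW Solar"))) (fun c => c) false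
  (head ++ tail).map (fun c => (c, tasks.filter (fun t => pvCat t == c)))

-- ===== PRECONDITION & SPEC =====
def Spec_group_tasks_by_category_py (tasks : List (List (String × String))) (out : List (String × List (List (String × String)))) : Prop := out = group_tasks_by_category_py_alt tasks
instance (tasks : List (List (String × String))) (out : List (String × List (List (String × String)))) : Decidable (Spec_group_tasks_by_category_py tasks out) := by unfold Spec_group_tasks_by_category_py; infer_instance

-- ===== CLAIM (what is proved, stated in full; the proofs are below) =====
def Claim_equal_group_tasks_by_category_py : Prop := ∀ (tasks : List (List (String × String))), Dom_group_tasks_by_category_py tasks → Spec_group_tasks_by_category_py tasks (group_tasks_by_category_py tasks)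

-- ===== LEMMAS AND PROOFS =====

-- A's bucket-building loop, named
def pvGroups (tasks : List (List (String × String))) :
    PySem.Dict String (List (List (String × String))) :=
  tasks.foldl (fun g t => g.modify (pvCat t) [] (fun l => l ++ [t])) PySem.Dict.empty

theorem pvA_eq (tasks : List (List (String × String))) :
    group_tasks_by_category_py tasks =
      (let groups := pvGroups tasks
       let ordered : PySem.Dict String (List (List (String × String))) :=
         if groups.contains "DSW Solar" then
           PySem.Dict.empty.insert "DSW Solar" (groups.getD "DSW Solar" [])
         else PySem.Dict.empty
       let groups2 := if groups.contains "DSW Solar" then groups.erase "DSW Solar" else groups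
       ((PySem.List.sorted groups2.keys (fun k => k) false).foldl
         (fun o k => o.insert k (groups2.getD k [])) ordered).items) := rfl

theorem pvGroups_getD (tasks : List (List (String × String))) (c : String) :
    (pvGroups tasks).getD c [] = tasks.filter (fun t => pvCat t == c) := by
  have h : pvGroups tasks
      = (tasks.map (fun t => (pvCat t, t))).foldl
          (fun g p => g.modify p.1 [] (fun l => l ++ [p.2])) PySem.Dict.empty := by
    rw [List.foldl_map]
    rfl
  rw [h, PySem.Dict.getD_foldl_modify_append]
  simp [List.filter_map, List.map_map, Function.comp_def]

theorem pvGroups_keys (tasks : List (List (String × String))) :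
    (pvGroups tasks).keys = PySem.List.dedup (tasks.map pvCat) := by
  rw [pvGroups, PySem.Dict.keys_foldl_modify_key]
  simp [PySem.Set.update, PySem.List.dedup_eq_ofList, PySem.Set.ofList_eq_foldl,
    PySem.Dict.keys_empty]

theorem pvErase_get? {V : Type} (l : List (String × V)) (k k' : String) (h : k' ≠ k) :
    (PySem.Dict.mk (l.filter (fun p => !(p.1 == k)))).get? k' = (PySem.Dict.mk l).get? k' := by
  induction l with
  | nil => rfl
  | cons a l ih =>
    obtain ⟨a1, a2⟩ := a
    by_cases hak : a1 = k
    · simp [hak, PySem.Dict.get?_mk_cons, Ne.symm h, ih]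
    · simp [hak, PySem.Dict.get?_mk_cons, ih]

theorem pvErase_getD {V : Type} (d : PySem.Dict String V) (k k' : String) (h : k' ≠ k)
    (dflt : V) : (d.erase k).getD k' dflt = d.getD k' dflt := by
  have h2 := pvErase_get? d.items k k' h
  simp only [PySem.Dict.getD, PySem.Dict.erase] at *
  rw [h2]

theorem pvErase_keys {V : Type} (d : PySem.Dict String V) (k : String) :
    (d.erase k).keys = d.keys.filter (fun c => !(c == k)) := by
  simp [PySem.Dict.erase, PySem.Dict.keys, List.filter_map, Function.comp_def]

theorem pvMain (tasks : List (List (String × String))) :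
    group_tasks_by_category_py tasks = group_tasks_by_category_py_alt tasks := by
  have hkeys := pvGroups_keys tasks
  have hcont : (pvGroups tasks).contains "DSW Solar"
      = decide ("DSW Solar" ∈ PySem.List.dedup (tasks.map pvCat)) := by
    rw [PySem.Dict.contains_eq_decide_mem_keys, hkeys]
  rw [pvA_eq]
  simp only [group_tasks_by_category_py_alt]
  by_cases hm : "DSW Solar" ∈ PySem.List.dedup (tasks.map pvCat)
  · -- 'DSW Solar' occurs among the resolved categories
    have hc : (pvGroups tasks).contains "DSW Solar" = true := by
      rw [hcont]; simpa using hm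
    simp only [hc, hm, if_true, List.singleton_append]
    rw [pvErase_keys, hkeys]
    have htailmem : ∀ a ∈ PySem.List.sorted
        ((PySem.List.dedup (tasks.map pvCat)).filter (fun c => !(c == "DSW Solar")))
        (fun k => k) false, a ≠ "DSW Solar" := by
      intro a ha
      rw [PySem.List.mem_sorted] at ha
      simpa using (List.mem_filter.mp ha).2
    have hnd : (PySem.List.sorted
        ((PySem.List.dedup (tasks.map pvCat)).filter (fun c => !(c == "DSW Solar")))
        (fun k => k) false).Nodup :=
      ((PySem.List.sorted_perm _ _ _).nodup_iff).mpr
        ((PySem.List.nodup_dedup _).filter _)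
    have key := PySem.Dict.items_foldl_insert_fresh
      (PySem.List.sorted
        ((PySem.List.dedup (tasks.map pvCat)).filter (fun c => !(c == "DSW Solar")))
        (fun k => k) false)
      (fun a : String => a)
      (fun a => ((pvGroups tasks).erase "DSW Solar").getD a [])
      (PySem.Dict.empty.insert "DSW Solar" ((pvGroups tasks).getD "DSW Solar" []))
      (by intro a ha
          simp only [PySem.Dict.contains_insert, PySem.Dict.contains_empty, Bool.or_false]
          simpa using htailmem a ha)
      (by simpa using hnd)
    simp only [] at key
    rw [key, PySem.Dict.items_insert_of_not_contains _ _ (PySem.Dict.contains_empty _)]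
    rw [pvGroups_getD]
    simp only [PySem.Dict.empty, List.nil_append, List.map_cons, List.cons_append]
    congr 1
    apply List.map_congr_left
    intro a ha
    rw [pvErase_getD _ _ _ (htailmem a ha), pvGroups_getD]
  · -- no 'DSW Solar' bucket
    have hc : (pvGroups tasks).contains "DSW Solar" = false := by
      rw [hcont]; simpa using hm
    simp only [hc, hm, Bool.false_eq_true, if_false, List.nil_append]
    rw [hkeys]
    have hfilter : (PySem.List.dedup (tasks.map pvCat)).filter (fun c => !(c == "DSW Solar"))
        = PySem.List.dedup (tasks.map pvCat) := by
      rw [List.filter_eq_self]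
      intro a ha
      simp only [Bool.not_eq_eq_eq_not, Bool.not_true, beq_eq_false_iff_ne, ne_eq]
      intro h'; exact hm (h' ▸ ha)
    rw [hfilter]
    have hnd : (PySem.List.sorted (PySem.List.dedup (tasks.map pvCat))
        (fun k => k) false).Nodup :=
      ((PySem.List.sorted_perm _ _ _).nodup_iff).mpr (PySem.List.nodup_dedup _)
    have key := PySem.Dict.items_foldl_insert_fresh
      (PySem.List.sorted (PySem.List.dedup (tasks.map pvCat)) (fun k => k) false)
      (fun a : String => a)
      (fun a => (pvGroups tasks).getD a [])
      PySem.Dict.empty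
      (by intro a _; exact PySem.Dict.contains_empty _)
      (by simpa using hnd)
    simp only [] at key
    rw [key]
    simp only [PySem.Dict.empty, List.nil_append]
    apply List.map_congr_left
    intro a _
    rw [pvGroups_getD]

-- ===== VERDICT (by name: the statement is the Claim_ definition above) =====
theorem group_tasks_by_category_py_spec : Claim_equal_group_tasks_by_category_py := by
  intro tasks _
  exact pvMain tasks
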